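-- pv_equiv track=rewrite | github.com/Innovate-To-Grow/Innovate-To-Grow-Website | src/core/security.py | _is_allowed_sns_host
-- ===== SOURCE A (Python) =====
-- def _is_safe_dns_label(label: str) -> bool:
--     if not label or len(label) > 63 or label.startswith("-") or label.endswith("-"):
--         return False
--     return all(char.isascii() and (char.isalnum() or char == "-") for char in label)
--
-- def _is_allowed_sns_host(host: str) -> bool:
--     for suffix in (".amazonaws.com", ".amazonaws.com.cn"):
--         if host == f"sns{suffix}":
--             return True
--         if not host.endswith(suffix):
--             continue
--         labels = host[: -len(suffix)].split(".")
--         return labels[0] == "sns" and all(_is_safe_dns_label(label) for label in labels[1:])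
--     return False
-- ===== SOURCE B (Python) =====
-- def _is_allowed_sns_host(host: str) -> bool:
--     # Strip the mandatory AWS suffix, then validate "sns" + optional extra labels
--     # in one character-level pass (no split, no per-label rescans).
--     if host.endswith(".amazonaws.com.cn"):
--         core = host[:-17]
--     elif host.endswith(".amazonaws.com"):
--         core = host[:-14]
--     else:
--         return False
--     if core == "sns":
--         return True
--     if not core.startswith("sns."):
--         return False
--     n = 0
--     head_hyphen = False
--     tail_hyphen = False
--     for ch in core[4:]:
--         if ch == ".":
--             if n == 0 or head_hyphen or tail_hyphen:
--                 return False
--             n = 0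
--         elif ch.isascii() and (ch.isalnum() or ch == "-"):
--             if n == 0:
--                 head_hyphen = ch == "-"
--             tail_hyphen = ch == "-"
--             n += 1
--             if n > 63:
--                 return False
--         else:
--             return False
--     return n > 0 and not head_hyphen and not tail_hyphen
-- ===== Notes on version B (the rewrite author's own statement) =====
-- stated objective: alternative
-- what changed: A splits the stripped host into labels and re-scans each label with startswith/endswith/all; B strips the fixed suffix and validates all remaining labels in a single left-to-right character scan that tracks label length and leading/trailing hyphens, with no split and no per-label rescans.
import Mathlib
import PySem

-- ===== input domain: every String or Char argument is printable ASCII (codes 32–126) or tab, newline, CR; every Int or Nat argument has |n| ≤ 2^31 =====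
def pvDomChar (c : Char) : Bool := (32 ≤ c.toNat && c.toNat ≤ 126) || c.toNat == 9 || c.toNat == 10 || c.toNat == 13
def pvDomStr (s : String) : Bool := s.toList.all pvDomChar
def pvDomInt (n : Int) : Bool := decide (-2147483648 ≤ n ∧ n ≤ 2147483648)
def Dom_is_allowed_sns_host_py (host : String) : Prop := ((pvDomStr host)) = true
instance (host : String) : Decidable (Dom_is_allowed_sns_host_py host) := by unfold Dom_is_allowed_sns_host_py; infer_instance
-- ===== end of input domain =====

-- B replaces the split-into-labels + per-label rescan of A by a single character-level
-- left-to-right scan after stripping the fixed suffix (objective: alternative single pass).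

-- ===== PORT A =====
-- _is_safe_dns_label; char.isascii() is ported as c.toNat < 128 (exact).
def pvSafeLabel (label : List Char) : Bool :=
  if label = [] || PySem.Chars.len label > 63
      || PySem.Chars.startswith label ['-'] || PySem.Chars.endswith label ['-'] then
    false
  else
    label.all (fun c => decide (c.toNat < 128) && (PySem.Chars.isalnum c || c == '-'))

-- the 'for suffix in (...)' loop of A; 'continue' = recurse on the remaining suffixes.
-- labels[0] is ported as headD [] (split never returns an empty list, so this is exact);
-- labels[1:] is the slice labels[1:].
def pvLoopA (hs : List Char) : List (List Char) → Bool
  | [] => false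
  | suffix :: rest =>
    if hs = ['s', 'n', 's'] ++ suffix then true
    else if PySem.Chars.endswith hs suffix = false then pvLoopA hs rest
    else
      let labels := PySem.Chars.splitOn
        (PySem.Chars.slice hs none (some (-(PySem.Chars.len suffix : Int)))) ['.']
      (labels.headD []) == ['s', 'n', 's']
        && (PySem.List.slice labels (some 1) none).all pvSafeLabel

def is_allowed_sns_host_py (host : String) : Bool :=
  pvLoopA host.toList [".amazonaws.com".toList, ".amazonaws.com.cn".toList]

-- ===== PORT B =====
-- the character loop of Source B; state = (n, head_hyphen, tail_hyphen).
def pvScanB : List Char → Nat → Bool → Bool → Bool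
  | [], n, hh, th => decide (0 < n) && !hh && !th
  | c :: cs, n, hh, th =>
    if c = '.' then
      if n = 0 || hh || th then false else pvScanB cs 0 hh th
    else if decide (c.toNat < 128) && (PySem.Chars.isalnum c || c == '-') then
      let hh' := if n = 0 then c == '-' else hh
      let th' := c == '-'
      if n + 1 > 63 then false else pvScanB cs (n + 1) hh' th'
    else false

-- the code of Source B after 'core' has been computed
def pvCoreB (core : List Char) : Bool :=
  if core = ['s', 'n', 's'] then true
  else if PySem.Chars.startswith core ['s', 'n', 's', '.'] = false then false
  else pvScanB (PySem.Chars.slice core (some 4) none) 0 false false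

def is_allowed_sns_host_py_alt (host : String) : Bool :=
  if PySem.Str.endswith host ".amazonaws.com.cn" then
    pvCoreB (PySem.Chars.slice host.toList none (some (-17)))
  else if PySem.Str.endswith host ".amazonaws.com" then
    pvCoreB (PySem.Chars.slice host.toList none (some (-14)))
  else false

-- ===== PRECONDITION & SPEC =====
def Spec_is_allowed_sns_host_py (host : String) (out : Bool) : Prop := out = is_allowed_sns_host_py_alt host
instance (host : String) (out : Bool) : Decidable (Spec_is_allowed_sns_host_py host out) := by unfold Spec_is_allowed_sns_host_py; infer_instance

-- ===== CLAIM (what is proved, stated in full; the proofs are below) =====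
def Claim_equal_is_allowed_sns_host_py : Prop := ∀ (host : String), Dom_is_allowed_sns_host_py host → Spec_is_allowed_sns_host_py host (is_allowed_sns_host_py host)

-- ===== LEMMAS AND PROOFS =====

def pvMySplit : List Char → List Char × List (List Char)
  | [] => ([], [])
  | c :: t =>
    if c = '.' then ([], (pvMySplit t).1 :: (pvMySplit t).2)
    else (c :: (pvMySplit t).1, (pvMySplit t).2)

lemma pvSplitOn_go_eq (cs : List Char) : ∀ (fuel : Nat) (cur : List Char) (acc : List (List Char)),
    cs.length ≤ fuel →
    PySem.Chars.splitOn.go ['.'] fuel cs cur acc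
      = acc.reverse ++ (cur.reverse ++ (pvMySplit cs).1) :: (pvMySplit cs).2 := by
  induction cs with
  | nil =>
    intro fuel cur acc _
    cases fuel <;> simp [PySem.Chars.splitOn.go, pvMySplit]
  | cons c t ih =>
    intro fuel cur acc hf
    cases fuel with
    | zero => simp at hf
    | succ f =>
      simp only [PySem.Chars.splitOn.go]
      by_cases hc : c = '.'
      · subst hc
        have hp : List.isPrefixOf ['.'] ('.' :: t) = true := by simp [List.isPrefixOf]
        rw [if_pos hp]
        have hd : List.drop ['.'].length ('.' :: t) = t := by simp
        rw [hd]
        simp only [List.length_cons] at hf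
        rw [ih f [] _ (by omega)]
        simp [pvMySplit]
      · have hp : List.isPrefixOf ['.'] (c :: t) = false := by
          simp [List.isPrefixOf]; exact fun h => (hc h.symm).elim
        rw [if_neg (by simp [hp])]
        simp only [List.length_cons] at hf
        rw [ih f (c :: cur) acc (by omega)]
        simp [pvMySplit, hc]

lemma pvSplitOn_eq (cs : List Char) :
    PySem.Chars.splitOn cs ['.'] = (pvMySplit cs).1 :: (pvMySplit cs).2 := by
  unfold PySem.Chars.splitOn
  rw [pvSplitOn_go_eq cs (cs.length + 1) [] [] (by omega)]
  simp

lemma pvStartswith_dash (p : List Char) :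
    PySem.Chars.startswith p ['-'] = decide (p.head? = some '-') := by
  cases p with
  | nil => simp [PySem.Chars.startswith, List.isPrefixOf]
  | cons a q =>
    simp only [PySem.Chars.startswith, List.isPrefixOf, List.head?_cons,
      Bool.and_true, Option.some.injEq]
    by_cases h : a = '-'
    · simp [h]
    · simp [h]
      exact fun hh => h hh.symm

lemma pvEndswith_dash (p : List Char) :
    PySem.Chars.endswith p ['-'] = decide (p.getLast? = some '-') := by
  have h : PySem.Chars.endswith p ['-'] = PySem.Chars.startswith p.reverse ['-'] := by
    simp [PySem.Chars.endswith, PySem.Chars.startswith, List.isSuffixOf]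
  rw [h, pvStartswith_dash, List.head?_reverse]

lemma pvSafe_false_of_invalid {c : Char} {label : List Char} (hc : c ∈ label)
    (hv : (decide (c.toNat < 128) && (PySem.Chars.isalnum c || c == '-')) = false) :
    pvSafeLabel label = false := by
  unfold pvSafeLabel
  split
  · rfl
  · rw [List.all_eq_false]
    exact ⟨c, hc, by simp [hv]⟩

lemma pvSafe_false_of_long {label : List Char} (h : 63 < label.length) :
    pvSafeLabel label = false := by
  unfold pvSafeLabel
  rw [if_pos]
  simp [PySem.Chars.len]
  omega

lemma pvSafe_of_parts {label : List Char} (hne : label ≠ []) (hlen : label.length ≤ 63)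
    (hall : ∀ c ∈ label, (decide (c.toNat < 128) && (PySem.Chars.isalnum c || c == '-')) = true)
    (hh : ¬ label.head? = some '-') (ht : ¬ label.getLast? = some '-') :
    pvSafeLabel label = true := by
  unfold pvSafeLabel
  rw [if_neg]
  · rw [List.all_eq_true]; exact hall
  · simp [hne, PySem.Chars.len, pvStartswith_dash, pvEndswith_dash, hh, ht]
    omega

lemma pvSafe_false_of_head_dash {label : List Char} (h : label.head? = some '-') :
    pvSafeLabel label = false := by
  unfold pvSafeLabel
  rw [if_pos]
  simp [pvStartswith_dash, h]

lemma pvSafe_false_of_last_dash {label : List Char} (h : label.getLast? = some '-') :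
    pvSafeLabel label = false := by
  unfold pvSafeLabel
  rw [if_pos]
  simp [pvEndswith_dash, h]

lemma pvScan_eq (cs : List Char) : ∀ (p : List Char) (hh th : Bool),
    p.length ≤ 63 →
    (∀ c ∈ p, (decide (c.toNat < 128) && (PySem.Chars.isalnum c || c == '-')) = true) →
    (p = [] ∨ (hh = decide (p.head? = some '-') ∧ th = decide (p.getLast? = some '-'))) →
    pvScanB cs p.length hh th
      = (pvSafeLabel (p ++ (pvMySplit cs).1) && (pvMySplit cs).2.all pvSafeLabel) := by
  induction cs with
  | nil =>
    intro p hh th hlen hall hst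
    rcases hst with h | ⟨h1, h2⟩
    · subst h; simp [pvScanB, pvMySplit, pvSafeLabel]
    · rcases eq_or_ne p [] with hp | hp
      · subst hp; simp [pvScanB, pvMySplit, pvSafeLabel, h1, h2]
      · simp only [pvScanB, pvMySplit, List.append_nil, List.all_nil, Bool.and_true]
        by_cases hhd : p.head? = some '-'
        · rw [pvSafe_false_of_head_dash hhd]; simp [h1, hhd]
        · by_cases htl : p.getLast? = some '-'
          · rw [pvSafe_false_of_last_dash htl]; simp [h2, htl]
          · rw [pvSafe_of_parts hp hlen hall hhd htl]
            simp [h1, h2, hhd, htl, List.length_pos_iff.mpr hp]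
  | cons c t ih =>
    intro p hh th hlen hall hst
    by_cases hc : c = '.'
    · subst hc
      have hsplit : pvMySplit ('.' :: t) = ([], (pvMySplit t).1 :: (pvMySplit t).2) := by
        simp [pvMySplit]
      rcases eq_or_ne p [] with hp | hp
      · subst hp; simp [pvScanB, hsplit, pvSafeLabel]
      · rcases hst with h | ⟨h1, h2⟩
        · exact absurd h hp
        by_cases hhd : p.head? = some '-'
        · have hh1 : hh = true := by simp [h1, hhd]
          simp [pvScanB, hsplit, hh1, pvSafe_false_of_head_dash hhd]
        · by_cases htl : p.getLast? = some '-'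
          · have ht1 : th = true := by simp [h2, htl]
            simp [pvScanB, hsplit, ht1, pvSafe_false_of_last_dash htl]
          · have hh0 : hh = false := by simp [h1, hhd]
            have ht0 : th = false := by simp [h2, htl]
            have hlp : p.length ≠ 0 := by simp [hp]
            have hred : pvScanB ('.' :: t) p.length hh th = pvScanB t 0 hh th := by
              simp [pvScanB, hh0, ht0, hlp]
            rw [hred, hh0, ht0]
            have hih := ih [] false false (by simp) (by simp) (Or.inl rfl)
            simp only [List.length_nil] at hih
            rw [hih, hsplit]
            simp [pvSafe_of_parts hp hlen hall hhd htl]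
    · have hsplit : pvMySplit (c :: t) = (c :: (pvMySplit t).1, (pvMySplit t).2) := by
        simp [pvMySplit, hc]
      by_cases hv : (decide (c.toNat < 128) && (PySem.Chars.isalnum c || c == '-')) = true
      · by_cases hbig : p.length + 1 > 63
        · have hlong : pvSafeLabel (p ++ (pvMySplit (c :: t)).1) = false := by
            apply pvSafe_false_of_long
            rw [hsplit]; simp; omega
          simp [pvScanB, hc, hv, hbig, hlong]
        · have hlen2 : (p ++ [c]).length ≤ 63 := by simp; omega
          have hall2 : ∀ x ∈ p ++ [c], (decide (x.toNat < 128) && (PySem.Chars.isalnum x || x == '-')) = true := by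
            intro x hx
            rcases List.mem_append.mp hx with h | h
            · exact hall x h
            · simp at h; subst h; exact hv
          have hst2 : (p ++ [c] = [] ∨ ((if p.length = 0 then (c == '-') else hh) = decide ((p ++ [c]).head? = some '-') ∧ (c == '-') = decide ((p ++ [c]).getLast? = some '-'))) := by
            right
            refine ⟨?_, ?_⟩
            · rcases eq_or_ne p [] with hp | hp
              · subst hp; simp; by_cases h : c = '-' <;> simp [h]
              · have hhd : (p ++ [c]).head? = p.head? := by
                  cases p with
                  | nil => exact absurd rfl hp
                  | cons a q => simp
                rw [hhd, if_neg (by simp [hp])]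
                rcases hst with h | ⟨h1, _⟩
                · exact absurd h hp
                · exact h1
            · simp only [List.getLast?_concat, Option.some.injEq]
              by_cases h : c = '-' <;> simp [h]
          have hih := ih (p ++ [c]) _ _ hlen2 hall2 hst2
          simp only [List.length_append, List.length_cons, List.length_nil] at hih
          have hred : pvScanB (c :: t) p.length hh th
              = pvScanB t (p.length + 1) (if p.length = 0 then (c == '-') else hh) (c == '-') := by
            simp [pvScanB, hc, hv, hbig]
          rw [hred, hih, hsplit]
          simp
      · rw [Bool.not_eq_true] at hv
        have hcm : c ∈ p ++ (pvMySplit (c :: t)).1 := by rw [hsplit]; simp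
        rw [pvSafe_false_of_invalid hcm hv]
        simp [pvScanB, hc, hv]

lemma pvMySplit_fst_eq_iff (cs : List Char) : ∀ (pre : List Char), '.' ∉ pre →
    ((pvMySplit cs).1 = pre ↔ cs = pre ∨ pre ++ ['.'] <+: cs) := by
  induction cs with
  | nil =>
    intro pre hpre
    simp only [pvMySplit]
    constructor
    · rintro rfl; exact Or.inl rfl
    · rintro (rfl | h)
      · rfl
      · rcases h with ⟨r, hr⟩
        cases pre <;> simp_all
  | cons c t ih =>
    intro pre hpre
    by_cases hc : c = '.'
    · subst hc
      simp only [pvMySplit]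
      constructor
      · rintro rfl
        exact Or.inr ⟨t, rfl⟩
      · rintro (rfl | ⟨r, hr⟩)
        · exact absurd (List.mem_cons_self) hpre
        · cases pre with
          | nil => rfl
          | cons a q =>
            simp only [List.cons_append, List.cons.injEq] at hr
            exact absurd (hr.1 ▸ List.mem_cons_self) hpre
    · simp only [pvMySplit, if_neg hc]
      cases pre with
      | nil =>
        simp only [List.nil_append]
        constructor
        · intro h; exact absurd h (by simp)
        · rintro (h | ⟨r, hr⟩)
          · exact absurd h.symm (by simp)
          · simp only [List.singleton_append, List.cons.injEq] at hr
            exact absurd hr.1.symm hc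
      | cons a q =>
        have hq : '.' ∉ q := fun h => hpre (List.mem_cons_of_mem _ h)
        constructor
        · intro h
          simp only [List.cons.injEq] at h
          rcases h with ⟨rfl, hfst⟩
          rcases (ih q hq).mp hfst with h | ⟨r, hr⟩
          · exact Or.inl (by rw [h])
          · exact Or.inr ⟨r, by simp [← hr]⟩
        · rintro (h | ⟨r, hr⟩)
          · simp only [List.cons.injEq] at h
            rcases h with ⟨rfl, rfl⟩
            exact congrArg (List.cons _) ((ih _ hq).mpr (Or.inl rfl))
          · simp only [List.cons_append, List.cons.injEq] at hr
            rcases hr with ⟨rfl, hr⟩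
            exact congrArg (List.cons _) ((ih q hq).mpr (Or.inr ⟨r, hr⟩))


lemma pvCoreAB (core : List Char) (hne : core ≠ ['s', 'n', 's']) :
    ((((pvMySplit core).1 :: (pvMySplit core).2).headD []) == ['s', 'n', 's']
        && (PySem.List.slice ((pvMySplit core).1 :: (pvMySplit core).2) (some 1) none).all pvSafeLabel)
      = pvCoreB core := by
  rw [PySem.List.slice_from_one]
  simp only [List.headD_cons, List.tail_cons]
  by_cases hsw : PySem.Chars.startswith core ['s', 'n', 's', '.'] = true
  · rcases (PySem.Chars.startswith_iff core ['s','n','s','.']).mp hsw with ⟨r, rfl⟩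
    have hfst : pvMySplit (['s','n','s','.'] ++ r)
        = (['s','n','s'], (pvMySplit r).1 :: (pvMySplit r).2) := by
      simp [pvMySplit]
    rw [hfst]
    simp only [beq_self_eq_true, Bool.true_and]
    unfold pvCoreB
    rw [if_neg hne, if_neg (by rw [hsw]; simp)]
    have hdrop : PySem.Chars.slice (['s','n','s','.'] ++ r) (some 4) none = r := by
      simp only [PySem.Chars.slice_eq_listSlice]
      rw [show (4 : Int) = ((4 : Nat) : Int) by norm_num, PySem.List.slice_from_natCast]
      simp
    rw [hdrop]
    have := pvScan_eq r [] false false (by simp) (by simp) (Or.inl rfl)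
    simp only [List.length_nil, List.nil_append] at this
    rw [this]
    simp [List.all_cons]
  · have hfst : ¬ (pvMySplit core).1 = ['s','n','s'] := by
      intro h
      rcases (pvMySplit_fst_eq_iff core ['s','n','s'] (by decide)).mp h with h | h
      · exact hne h
      · exact hsw ((PySem.Chars.startswith_iff core ['s','n','s','.']).mpr h)
    unfold pvCoreB
    rw [if_neg hne, if_pos (by simpa using hsw)]
    simp [hfst]

lemma pvSuffix_excl (hs : List Char) (h1 : PySem.Chars.endswith hs ".amazonaws.com".toList = true)
    (h2 : PySem.Chars.endswith hs ".amazonaws.com.cn".toList = true) : False := by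
  have s1 := (PySem.Chars.endswith_iff _ _).mp h1
  have s2 := (PySem.Chars.endswith_iff _ _).mp h2
  rcases List.suffix_or_suffix_of_suffix s1 s2 with h | h
  · exact absurd h (by decide)
  · exact absurd h (by decide)

lemma pvStrip (pre suf : List Char) (k : Nat) (hk : suf.length = k) (hpos : 1 < k) :
    PySem.Chars.slice (pre ++ suf) none (some (-(k : Int))) = pre := by
  simp only [PySem.Chars.slice_eq_listSlice]
  rw [show -((k : Nat) : Int) = -((k : Nat) : Int) from rfl]
  rw [PySem.List.slice_to_neg_natCast _ _ (by omega)]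
  rw [List.length_append, hk]
  have : pre.length + k - k = pre.length := by omega
  rw [this, List.take_left]

lemma pvMain (hs : List Char) :
    pvLoopA hs [".amazonaws.com".toList, ".amazonaws.com.cn".toList]
      = (if PySem.Chars.endswith hs ".amazonaws.com.cn".toList = true then
          pvCoreB (PySem.Chars.slice hs none (some (-17)))
        else if PySem.Chars.endswith hs ".amazonaws.com".toList = true then
          pvCoreB (PySem.Chars.slice hs none (some (-14)))
        else false) := by
  by_cases hcn : PySem.Chars.endswith hs ".amazonaws.com.cn".toList = true
  · rw [if_pos hcn]
    by_cases hcom : PySem.Chars.endswith hs ".amazonaws.com".toList = true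
    · exact (pvSuffix_excl hs hcom hcn).elim
    · obtain ⟨pre, rfl⟩ := (PySem.Chars.endswith_iff _ _).mp hcn
      rw [Bool.not_eq_true] at hcom
      have hstrip := pvStrip pre (".amazonaws.com.cn".toList) 17 (by decide) (by norm_num)
      have heq1 : ¬ (pre ++ ".amazonaws.com.cn".toList = ['s','n','s'] ++ ".amazonaws.com".toList) := by
        intro h; rw [h] at hcom; exact absurd hcom (by decide)
      by_cases heq2 : pre = ['s','n','s']
      · subst heq2
        simp only [pvLoopA, if_neg heq1, hcom]
        rw [show -((17:Nat):Int) = (-17 : Int) from rfl] at hstrip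
        rw [hstrip]
        decide
      · have heq2' : ¬ (pre ++ ".amazonaws.com.cn".toList = ['s','n','s'] ++ ".amazonaws.com.cn".toList) := by
          intro h; exact heq2 (List.append_cancel_right h)
        simp only [pvLoopA, if_neg heq1, hcom, if_neg heq2', hcn,
          if_neg (by simp : ¬ (true = false))]
        have hlen : PySem.Chars.len ".amazonaws.com.cn".toList = (17 : Int) := by decide
        rw [hlen]
        rw [show -((17:Nat):Int) = (-17 : Int) from rfl] at hstrip
        rw [hstrip, pvSplitOn_eq, pvCoreAB pre heq2]
        simp
  · rw [if_neg hcn]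
    by_cases hcom : PySem.Chars.endswith hs ".amazonaws.com".toList = true
    · rw [if_pos hcom]
      obtain ⟨pre, rfl⟩ := (PySem.Chars.endswith_iff _ _).mp hcom
      have hstrip := pvStrip pre (".amazonaws.com".toList) 14 (by decide) (by norm_num)
      rw [show -((14:Nat):Int) = (-14 : Int) from rfl] at hstrip
      by_cases heq1 : pre = ['s','n','s']
      · subst heq1
        simp only [pvLoopA]
        rw [hstrip]
        decide
      · have heq1' : ¬ (pre ++ ".amazonaws.com".toList = ['s','n','s'] ++ ".amazonaws.com".toList) := by
          intro h; exact heq1 (List.append_cancel_right h)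
        simp only [pvLoopA, if_neg heq1', hcom, if_neg (by simp : ¬ (true = false))]
        have hlen : PySem.Chars.len ".amazonaws.com".toList = (14 : Int) := by decide
        rw [hlen, hstrip, pvSplitOn_eq, pvCoreAB pre heq1]
    · rw [if_neg hcom]
      have heqA : ¬ (hs = ['s','n','s'] ++ ".amazonaws.com".toList) := by
        intro h; rw [h] at hcom; exact hcom (by decide)
      have heqB : ¬ (hs = ['s','n','s'] ++ ".amazonaws.com.cn".toList) := by
        intro h; rw [h] at hcn; exact hcn (by decide)
      rw [Bool.not_eq_true] at hcom hcn
      simp only [pvLoopA, if_neg heqA, if_neg heqB, hcom, hcn]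
      simp

-- ===== VERDICT (by name: the statement is the Claim_ definition above) =====
theorem is_allowed_sns_host_py_spec : Claim_equal_is_allowed_sns_host_py := by
  intro host _
  unfold Spec_is_allowed_sns_host_py is_allowed_sns_host_py is_allowed_sns_host_py_alt
  simp only [PySem.Str.endswith_eq]
  exact pvMain host.toList
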